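-- pv_equiv track=rewrite | github.com/vivekpapnai/Python-DSA-Questions | rough.py | spclTrip
-- ===== SOURCE A (Python) =====
-- def spclTrip(n):
--     count = 0
--     for c in range(1, n + 1):
--         for b in range(c, n + 1, c):
--             if b%c == 0:
--                 for a in range(c, n + 1, b):
--                     if a % b == c:
--                         count += 1
--
--     return count
-- ===== SOURCE B (Python) =====
-- def spclTrip(n):
--     # A's innermost loop counts a in range(c, n+1, b) with a % b == c: for b == c
--     # it counts nothing (a % c == 0 != c), and for b a larger multiple of c it
--     # counts the whole range, of length (n - c)//b + 1.  So walk the multiples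
--     # b = 2c, 3c, ... of each c with explicit while loops and add that closed
--     # form directly; no innermost loop and no modulo tests remain.
--     total = 0
--     c = 1
--     while c <= n:
--         b = 2 * c
--         while b <= n:
--             total += (n - c) // b + 1
--             b += c
--         c += 1
--     return total
-- ===== Notes on version B (the rewrite author's own statement) =====
-- stated objective: faster
-- what changed: B drops the innermost loop and both modulo tests entirely: for each c it walks the multiples b = 2c, 3c, ... with while loops and adds the closed form (n-c)//b + 1 (the innermost range is empty of hits for b == c and all hits for b > c), ported as a pair of recursive functions rather than folds over ranges.
import Mathlib
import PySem

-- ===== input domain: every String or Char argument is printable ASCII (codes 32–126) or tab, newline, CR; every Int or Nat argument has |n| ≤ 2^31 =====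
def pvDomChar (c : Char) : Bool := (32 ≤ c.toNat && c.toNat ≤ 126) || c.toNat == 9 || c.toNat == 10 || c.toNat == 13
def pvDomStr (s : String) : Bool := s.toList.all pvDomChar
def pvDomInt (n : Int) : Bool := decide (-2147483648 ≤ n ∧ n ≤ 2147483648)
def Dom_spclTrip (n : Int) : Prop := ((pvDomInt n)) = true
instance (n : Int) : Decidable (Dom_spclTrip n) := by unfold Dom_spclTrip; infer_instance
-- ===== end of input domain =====

-- B removes A's innermost loop and modulo tests: it walks the multiples b = 2c, 3c, …
-- with while loops and adds the closed form (n-c)//b + 1; equal return value proved for all n.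

-- ===== PORT A =====
def spclTrip (n : Int) : Int :=
  (PySem.List.pyRange 1 (n + 1) 1).foldl (fun count c =>
    (PySem.List.pyRange c (n + 1) c).foldl (fun count b =>
      if PySem.Int.mod b c == 0 then
        (PySem.List.pyRange c (n + 1) b).foldl (fun count a =>
          if PySem.Int.mod a b == c then count + 1 else count) count
      else count) count) 0

-- ===== PORT B =====
-- inner while loop: b = 2c, b += c while b <= n (the 0 < c guard only makes the
-- recursion total; the loop is only reached with 1 ≤ c)
def pvInnerB (n c b : Int) : Int :=
  if 0 < c ∧ b ≤ n then (PySem.Int.floordiv (n - c) b + 1) + pvInnerB n c (b + c) else 0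
termination_by (n + 1 - b).toNat
decreasing_by omega

-- outer while loop: c = 1, c += 1 while c <= n
def pvOuterB (n c : Int) : Int :=
  if c ≤ n then pvInnerB n c (2 * c) + pvOuterB n (c + 1) else 0
termination_by (n + 1 - c).toNat
decreasing_by omega

def spclTrip_alt (n : Int) : Int := pvOuterB n 1

-- ===== PRECONDITION & SPEC =====
def Spec_spclTrip (n : Int) (out : Int) : Prop := out = spclTrip_alt n
instance (n : Int) (out : Int) : Decidable (Spec_spclTrip n out) := by unfold Spec_spclTrip; infer_instance

-- ===== CLAIM (what is proved, stated in full; the proofs are below) =====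
def Claim_equal_spclTrip : Prop := ∀ (n : Int), Dom_spclTrip n → Spec_spclTrip n (spclTrip n)

-- ===== LEMMAS AND PROOFS =====

-- range(a, b, s) with 0 < s and a < b starts with a
theorem pyRange_pos_cons (a b s : Int) (hs : 0 < s) (h : a < b) :
    PySem.List.pyRange a b s = a :: PySem.List.pyRange (a + s) b s := by
  rw [PySem.List.pyRange_of_pos a b hs, PySem.List.pyRange_of_pos (a + s) b hs]
  by_cases h2 : a + s < b
  · have e : b - a + s - 1 = (b - (a + s) + s - 1) + 1 * s := by ring
    have e2 : (b - a + s - 1) / s = (b - (a + s) + s - 1) / s + 1 := by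
      rw [e]; exact Int.add_mul_ediv_right _ _ (by omega)
    have hnn : 0 ≤ (b - (a + s) + s - 1) / s :=
      Int.ediv_nonneg (by omega) (by omega)
    have hN : ((b - a + s - 1) / s).toNat = ((b - (a + s) + s - 1) / s).toNat + 1 := by
      omega
    simp only [if_pos h, if_pos h2, hN, List.range_succ_eq_map, List.map_cons, List.map_map]
    congr 1
    · simp
    · apply List.map_congr_left
      intro k _
      simp only [Function.comp, Nat.succ_eq_add_one]
      push_cast
      ring
  · have hN : ((b - a + s - 1) / s).toNat = 1 := by
      have h1 : s ≤ b - a + s - 1 := by omega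
      have hlo : 1 ≤ (b - a + s - 1) / s := by
        have := Int.ediv_le_ediv hs h1
        simpa [Int.ediv_self (show s ≠ 0 by omega)] using this
      have hhi : (b - a + s - 1) / s < 2 := by
        apply Int.ediv_lt_of_lt_mul hs
        omega
      omega
    simp only [if_pos h, if_neg h2, hN]
    simp

-- range(a, b, s) with 0 < s and b ≤ a is empty
theorem pyRange_pos_nil (a b s : Int) (hs : 0 < s) (h : b ≤ a) :
    PySem.List.pyRange a b s = [] := by
  rw [PySem.List.pyRange_of_pos a b hs, if_neg (by omega)]
  simp

-- counting loop: each step adds 1, so the result is init + length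
theorem foldl_add_one_len (l : List Int) (init : Int) :
    l.foldl (fun acc _ => acc + 1) init = init + l.length := by
  induction l generalizing init with
  | nil => simp
  | cons x xs ih => simp [List.foldl_cons, ih]; omega

-- A's innermost loop for b = c contributes nothing (a % c == 0 ≠ c)
theorem spclTrip_innerA_self (n c init : Int) (hc : 0 < c) :
    (PySem.List.pyRange c (n + 1) c).foldl (fun count a =>
      if PySem.Int.mod a c == c then count + 1 else count) init = init := by
  rw [PySem.List.foldl_congr_mem _ _ (fun acc _ => acc) init ?_]
  · exact PySem.List.foldl_ignore _ _
  · intro acc x hx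
    rcases (PySem.List.mem_pyRange_iff_of_pos hc x).mp hx with ⟨h1, _, h3⟩
    obtain ⟨k, hk⟩ := h3
    have hdvd : c ∣ x := ⟨k + 1, by rw [mul_add]; omega⟩
    have hmod : PySem.Int.mod x c = 0 := by
      unfold PySem.Int.mod
      rw [Int.fmod_eq_emod]
      simp [Int.emod_eq_zero_of_dvd hdvd, hdvd]
    rw [hmod]
    simp [show ¬((0:Int) = c) by omega]

-- the closed form for A's innermost loop when c < b ≤ n
theorem spclTrip_innerA_count (n c b init : Int) (hc : 0 < c) (hcb : c < b) (hcn : c ≤ n) :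
    (PySem.List.pyRange c (n + 1) b).foldl (fun count a =>
      if PySem.Int.mod a b == c then count + 1 else count) init
      = init + (PySem.Int.floordiv (n - c) b + 1) := by
  have hb : (0:Int) < b := by omega
  rw [PySem.List.foldl_congr_mem _ _ (fun acc (_ : Int) => acc + 1) init ?_]
  · rw [foldl_add_one_len]
    have hlen : ((PySem.List.pyRange c (n + 1) b).length : Int)
        = PySem.Int.floordiv (n - c) b + 1 := by
      rw [PySem.List.pyRange_of_pos c (n + 1) hb]
      simp only [List.length_map, List.length_range]
      rw [if_pos (by omega : c < n + 1)]
      have e : n + 1 - c + b - 1 = (n - c) + 1 * b := by ring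
      rw [e, Int.add_mul_ediv_right _ _ (show b ≠ 0 by omega)]
      have hnn : 0 ≤ (n - c) / b := Int.ediv_nonneg (by omega) (by omega)
      unfold PySem.Int.floordiv
      rw [Int.fdiv_eq_ediv]
      simp only [if_pos (Or.inl (le_of_lt hb))]
      omega
    rw [hlen]
  · intro acc x hx
    rcases (PySem.List.mem_pyRange_iff_of_pos hb x).mp hx with ⟨h1, _, h3⟩
    have hmod : PySem.Int.mod x b = c := by
      unfold PySem.Int.mod
      rw [Int.fmod_eq_emod]
      rcases h3 with ⟨k, hk⟩
      have hx' : x = c + b * k := by omega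
      rw [hx', Int.add_mul_emod_self_left, Int.emod_eq_of_lt (by omega) hcb]
      simp [le_of_lt hb]
    simp [hmod]

-- B's inner recursion computes A's fold over the multiples of c starting at b0
theorem innerB_eq_foldl (n c : Int) (hc : 0 < c) : ∀ (k : ℕ) (b0 init : Int),
    (n + 1 - b0).toNat ≤ k →
    (PySem.List.pyRange b0 (n + 1) c).foldl
      (fun acc b => acc + (PySem.Int.floordiv (n - c) b + 1)) init
      = init + pvInnerB n c b0 := by
  intro k
  induction k with
  | zero =>
    intro b0 init hk
    have hb : n + 1 ≤ b0 := by omega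
    rw [pyRange_pos_nil b0 (n + 1) c hc hb, pvInnerB, if_neg (by omega)]
    simp
  | succ k ih =>
    intro b0 init hk
    by_cases hb : b0 < n + 1
    · rw [pyRange_pos_cons b0 (n + 1) c hc hb, List.foldl_cons,
        ih (b0 + c) _ (by omega)]
      conv_rhs => rw [pvInnerB, if_pos ⟨hc, (by omega : b0 ≤ n)⟩]
      ring
    · rw [pyRange_pos_nil b0 (n + 1) c hc (by omega), pvInnerB, if_neg (by omega)]
      simp

-- A's b-loop for a fixed c ∈ [1, n] equals B's inner while loop
theorem spclTrip_bloop (n c init : Int) (hc : 0 < c) (hcn : c < n + 1) :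
    (PySem.List.pyRange c (n + 1) c).foldl (fun count b =>
      if PySem.Int.mod b c == 0 then
        (PySem.List.pyRange c (n + 1) b).foldl (fun count a =>
          if PySem.Int.mod a b == c then count + 1 else count) count
      else count) init
    = init + pvInnerB n c (2 * c) := by
  rw [pyRange_pos_cons c (n + 1) c hc hcn, List.foldl_cons]
  rw [if_pos (show (PySem.Int.mod c c == 0) = true by simp [PySem.Int.mod])]
  rw [spclTrip_innerA_self n c init hc]
  rw [show c + c = 2 * c by ring]
  rw [← innerB_eq_foldl n c hc (n + 1 - 2 * c).toNat (2 * c) init le_rfl]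
  apply PySem.List.foldl_congr_mem
  intro acc b hb
  rcases (PySem.List.mem_pyRange_iff_of_pos hc b).mp hb with ⟨h1, h2, h3⟩
  obtain ⟨k, hk⟩ := h3
  have hdvd : c ∣ b := ⟨k + 2, by rw [mul_add]; omega⟩
  have hmod : PySem.Int.mod b c = 0 := by
    unfold PySem.Int.mod
    rw [Int.fmod_eq_emod]
    simp [Int.emod_eq_zero_of_dvd hdvd, hdvd]
  rw [if_pos (by simp [hmod])]
  exact spclTrip_innerA_count n c b acc hc (by omega) (by omega)

-- A's outer fold from c0 equals B's outer recursion
theorem outerB_eq_foldl (n : Int) : ∀ (k : ℕ) (c0 init : Int), 0 < c0 →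
    (n + 1 - c0).toNat ≤ k →
    (PySem.List.pyRange c0 (n + 1) 1).foldl (fun count c =>
      (PySem.List.pyRange c (n + 1) c).foldl (fun count b =>
        if PySem.Int.mod b c == 0 then
          (PySem.List.pyRange c (n + 1) b).foldl (fun count a =>
            if PySem.Int.mod a b == c then count + 1 else count) count
        else count) count) init
      = init + pvOuterB n c0 := by
  intro k
  induction k with
  | zero =>
    intro c0 init hc0 hk
    rw [PySem.List.pyRange_one_eq_nil (by omega), pvOuterB, if_neg (by omega)]
    simp
  | succ k ih =>
    intro c0 init hc0 hk
    by_cases hc : c0 < n + 1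
    · rw [PySem.List.pyRange_one_cons hc, List.foldl_cons,
        spclTrip_bloop n c0 init hc0 hc,
        ih (c0 + 1) _ (by omega) (by omega)]
      conv_rhs => rw [pvOuterB, if_pos (by omega : c0 ≤ n)]
      ring
    · rw [PySem.List.pyRange_one_eq_nil (by omega), pvOuterB, if_neg (by omega)]
      simp

-- ===== VERDICT (by name: the statement is the Claim_ definition above) =====
theorem spclTrip_spec : Claim_equal_spclTrip := by
  intro n _
  unfold Spec_spclTrip spclTrip spclTrip_alt
  simpa using outerB_eq_foldl n (n + 1 - 1).toNat 1 0 (by omega) le_rfl
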